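-- pv_equiv track=rewrite | github.com/booya-at/OpenGlider | openglider/Vector/__init__.py | rangefrom
-- ===== SOURCE A (Python) =====
-- def rangefrom(maxl, startpoint=0):
--     """Iterative, similar to range() but surrounding a certain startpoint"""
--     j = 1
--     if 0 <= startpoint <= maxl:
--         yield startpoint
--     while startpoint-j >= 0 or startpoint+j <= maxl:
--         if startpoint+j <= maxl:
--             yield startpoint+j
--         if maxl >= startpoint-j >= 0:
--             yield startpoint-j
--         j += 1
-- ===== SOURCE B (Python) =====
-- def rangefrom(maxl, startpoint=0):
--     """Build the full value set directly, then order it by distance from startpoint."""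
--     values = []
--     if 0 <= startpoint <= maxl:
--         values.append(startpoint)
--     values.extend(range(startpoint + 1, maxl + 1))
--     values.extend(range(0, min(startpoint, maxl + 1)))
--     values.sort(key=lambda v: 2 * abs(v - startpoint) + (v < startpoint))
--     yield from values
-- ===== Notes on version B (the rewrite author's own statement) =====
-- stated objective: alternative
-- what changed: Replaces the incremental spiral while-loop with building the candidate value set from two plain ranges and sorting it once by distance from startpoint (ties broken toward the upper value).
import Mathlib
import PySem

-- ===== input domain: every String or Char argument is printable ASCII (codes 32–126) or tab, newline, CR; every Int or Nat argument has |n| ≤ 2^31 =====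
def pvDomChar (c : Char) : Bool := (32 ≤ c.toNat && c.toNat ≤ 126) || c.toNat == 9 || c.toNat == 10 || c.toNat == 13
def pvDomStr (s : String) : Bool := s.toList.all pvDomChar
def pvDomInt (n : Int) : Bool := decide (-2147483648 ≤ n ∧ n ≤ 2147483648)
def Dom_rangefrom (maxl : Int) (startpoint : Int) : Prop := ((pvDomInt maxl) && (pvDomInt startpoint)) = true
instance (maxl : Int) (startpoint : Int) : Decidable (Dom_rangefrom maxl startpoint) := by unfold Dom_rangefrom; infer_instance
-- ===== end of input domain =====

-- B replaces A's incremental spiral loop by building the value set with two ranges and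
-- sorting it once by distance from the startpoint (objective: alternative decomposition).

-- ===== PORT A =====
-- the while loop of A: state (yielded values so far, kept reversed as a cons-list, j);
-- the two yields in source order (each pushed to the front, final reverse restores order)
def rangefromLoop (maxl : Int) (startpoint : Int) (acc : List Int) (j : Int) : List Int :=
  if startpoint - j ≥ 0 ∨ startpoint + j ≤ maxl then
    rangefromLoop maxl startpoint
      ((if maxl ≥ startpoint - j ∧ startpoint - j ≥ 0 then [startpoint - j] else []) ++
       (if startpoint + j ≤ maxl then [startpoint + j] else []) ++
       acc)
      (j + 1)
  else acc
termination_by (max startpoint (maxl - startpoint) + 1 - j).toNat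
decreasing_by omega

def rangefrom (maxl : Int) (startpoint : Int) : List Int :=
  (rangefromLoop maxl startpoint
    (if 0 ≤ startpoint ∧ startpoint ≤ maxl then [startpoint] else []) 1).reverse

-- ===== PORT B =====
def rangefrom_alt (maxl : Int) (startpoint : Int) : List Int :=
  let values : List Int :=
    (if 0 ≤ startpoint ∧ startpoint ≤ maxl then [startpoint] else []) ++
    PySem.List.pyRange (startpoint + 1) (maxl + 1) 1 ++
    PySem.List.pyRange 0 (min startpoint (maxl + 1)) 1
  PySem.List.sorted values (fun v => 2 * |v - startpoint| + (if v < startpoint then 1 else 0)) false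

-- ===== PRECONDITION & SPEC =====
def Spec_rangefrom (maxl : Int) (startpoint : Int) (out : List Int) : Prop := out = rangefrom_alt maxl startpoint
instance (maxl : Int) (startpoint : Int) (out : List Int) : Decidable (Spec_rangefrom maxl startpoint out) := by unfold Spec_rangefrom; infer_instance

-- ===== CLAIM (what is proved, stated in full; the proofs are below) =====
def Claim_equal_rangefrom : Prop := ∀ (maxl : Int) (startpoint : Int), Dom_rangefrom maxl startpoint → Spec_rangefrom maxl startpoint (rangefrom maxl startpoint)

-- ===== LEMMAS AND PROOFS =====

-- proof-side recurrence: the loop without its accumulator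
def spiral (maxl : Int) (startpoint : Int) (j : Int) : List Int :=
  if startpoint - j ≥ 0 ∨ startpoint + j ≤ maxl then
    (if startpoint + j ≤ maxl then [startpoint + j] else []) ++
    (if maxl ≥ startpoint - j ∧ startpoint - j ≥ 0 then [startpoint - j] else []) ++
    spiral maxl startpoint (j + 1)
  else []
termination_by (max startpoint (maxl - startpoint) + 1 - j).toNat
decreasing_by omega

theorem rev_ite (c : Prop) [Decidable c] (x : Int) :
    (if c then [x] else ([] : List Int)).reverse = (if c then [x] else []) := by
  split <;> simp

theorem rangefromLoop_eq_spiral (maxl startpoint : Int) (acc : List Int) (j : Int) :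
    rangefromLoop maxl startpoint acc j = (spiral maxl startpoint j).reverse ++ acc := by
  fun_induction rangefromLoop maxl startpoint acc j with
  | case1 acc j h ih =>
    simp only [dite_eq_ite] at ih
    rw [ih]
    conv_rhs => rw [spiral, if_pos h]
    simp only [List.reverse_append, rev_ite, List.append_assoc]
  | case2 acc j h =>
    rw [spiral, if_neg h]
    simp

theorem rangefrom_eq (maxl startpoint : Int) :
    rangefrom maxl startpoint =
      (if 0 ≤ startpoint ∧ startpoint ≤ maxl then [startpoint] else []) ++
      spiral maxl startpoint 1 := by
  rw [rangefrom, rangefromLoop_eq_spiral]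
  simp only [List.reverse_append, List.reverse_reverse, rev_ite]

-- A's loop from step j is a permutation of the two remaining ranges of B
theorem loop_perm (maxl startpoint j : Int) :
    (spiral maxl startpoint j).Perm
      (PySem.List.pyRange (startpoint + j) (maxl + 1) 1 ++
       PySem.List.pyRange 0 (min (startpoint - j + 1) (maxl + 1)) 1) := by
  fun_induction spiral maxl startpoint j with
  | case2 j h =>
    rw [PySem.List.pyRange_one_eq_nil (by omega), PySem.List.pyRange_one_eq_nil (by omega)]
    rfl
  | case1 j h ih =>
    rw [show startpoint + (j + 1) = startpoint + j + 1 by ring,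
      show startpoint - (j + 1) + 1 = startpoint - j by ring] at ih
    by_cases h1 : startpoint + j ≤ maxl
    · rw [if_pos h1, PySem.List.pyRange_one_cons (by omega : startpoint + j < maxl + 1)]
      by_cases h2 : maxl ≥ startpoint - j ∧ startpoint - j ≥ 0
      · rw [if_pos h2]
        have hm1 : min (startpoint - j + 1) (maxl + 1) = startpoint - j + 1 := by omega
        have hm2 : min (startpoint - j) (maxl + 1) = startpoint - j := by omega
        rw [hm1, PySem.List.pyRange_one_succ_right (by omega : (0:Int) ≤ startpoint - j)]
        simp only [List.cons_append]
        refine List.Perm.cons _ ?_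
        rw [hm2] at ih
        exact ((ih.cons _).trans (List.perm_append_singleton _ _).symm).trans
          (List.Perm.of_eq (List.append_assoc _ _ _))
      · rw [if_neg h2]
        simp only [List.cons_append]
        refine List.Perm.cons _ (ih.trans ?_)
        refine List.Perm.append_left _ ?_
        by_cases hneg : startpoint - j < 0
        · rw [PySem.List.pyRange_one_eq_nil (by omega), PySem.List.pyRange_one_eq_nil (by omega)]
        · have : min (startpoint - j) (maxl + 1) = min (startpoint - j + 1) (maxl + 1) := by omega
          rw [this]
    · rw [if_neg h1, PySem.List.pyRange_one_eq_nil (by omega : maxl + 1 ≤ startpoint + j)]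
      have hs : startpoint - j ≥ 0 := by omega
      by_cases h2 : maxl ≥ startpoint - j ∧ startpoint - j ≥ 0
      · rw [if_pos h2]
        have hm1 : min (startpoint - j + 1) (maxl + 1) = startpoint - j + 1 := by omega
        have hm2 : min (startpoint - j) (maxl + 1) = startpoint - j := by omega
        rw [hm1, PySem.List.pyRange_one_succ_right (by omega : (0:Int) ≤ startpoint - j)]
        simp only [List.nil_append, List.singleton_append]
        refine (List.Perm.cons _ ?_).trans (List.perm_append_singleton _ _).symm
        rw [PySem.List.pyRange_one_eq_nil (by omega : maxl + 1 ≤ startpoint + j + 1), hm2,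
          List.nil_append] at ih
        exact ih
      · rw [if_neg h2]
        rw [PySem.List.pyRange_one_eq_nil (by omega : maxl + 1 ≤ startpoint + j + 1),
          List.nil_append,
          show min (startpoint - j) (maxl + 1) = min (startpoint - j + 1) (maxl + 1) by omega] at ih
        simpa using ih

-- every element yielded from step j on has key ≥ 2*j
theorem loop_key_lb (maxl startpoint j : Int) :
    ∀ v ∈ spiral maxl startpoint j,
      2 * j ≤ 2 * |v - startpoint| + (if v < startpoint then 1 else 0) := by
  fun_induction spiral maxl startpoint j with
  | case2 j h => simp
  | case1 j h ih =>
    intro v hv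
    rcases List.mem_append.mp hv with hv | hv
    · rcases List.mem_append.mp hv with hv | hv
      · have hveq : v = startpoint + j := by
          by_cases h1 : startpoint + j ≤ maxl
          · rw [if_pos h1] at hv; simpa using hv
          · rw [if_neg h1] at hv; simp at hv
        subst hveq
        rw [add_sub_cancel_left]
        rcases abs_cases j with ⟨he, _⟩ | ⟨he, _⟩ <;> split_ifs <;> omega
      · have hveq : v = startpoint - j := by
          by_cases h2 : maxl ≥ startpoint - j ∧ startpoint - j ≥ 0
          · rw [if_pos h2] at hv; simpa using hv
          · rw [if_neg h2] at hv; simp at hv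
        subst hveq
        rw [show startpoint - j - startpoint = -j by ring, abs_neg]
        rcases abs_cases j with ⟨he, _⟩ | ⟨he, _⟩ <;> split_ifs <;> omega
    · have := ih v hv
      omega

-- A's loop output is strictly increasing in the key
theorem loop_pairwise (maxl startpoint j : Int) (hj : 1 ≤ j) :
    (spiral maxl startpoint j).Pairwise
      (fun a b => 2 * |a - startpoint| + (if a < startpoint then 1 else 0) <
                  2 * |b - startpoint| + (if b < startpoint then 1 else 0)) := by
  revert hj
  fun_induction spiral maxl startpoint j with
  | case2 j h => intro _; simp
  | case1 j h ih =>
    intro hj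
    have e1 : 2 * |startpoint + j - startpoint| + (if startpoint + j < startpoint then (1:Int) else 0)
        = 2 * j := by
      rw [add_sub_cancel_left, abs_of_nonneg (by omega : (0:Int) ≤ j), if_neg (by omega)]; ring
    have e2 : 2 * |startpoint - j - startpoint| + (if startpoint - j < startpoint then (1:Int) else 0)
        = 2 * j + 1 := by
      rw [show startpoint - j - startpoint = -j by ring, abs_neg,
        abs_of_nonneg (by omega : (0:Int) ≤ j), if_pos (by omega)]
    have hlb := loop_key_lb maxl startpoint (j + 1)
    have hrec := ih (by omega)
    split_ifs with h1 h2 h2 <;>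
      simp only [List.cons_append, List.nil_append, List.pairwise_cons, List.mem_cons]
    · refine ⟨?_, ?_, hrec⟩
      · intro b hb
        rcases hb with rfl | hb
        · rw [e1, e2]; omega
        · have := hlb b hb; rw [e1]; omega
      · intro b hb; have := hlb b hb; rw [e2]; omega
    · refine ⟨?_, hrec⟩
      intro b hb; have := hlb b hb; rw [e1]; omega
    · refine ⟨?_, hrec⟩
      intro b hb; have := hlb b hb; rw [e2]; omega
    · exact hrec

-- ===== VERDICT (by name: the statement is the Claim_ definition above) =====
theorem rangefrom_spec : Claim_equal_rangefrom := by
  intro maxl s _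
  unfold Spec_rangefrom rangefrom_alt
  refine (PySem.List.sorted_eq_of_perm_of_pairwise_lt _ _ _ ?_ ?_).symm
  · rw [rangefrom_eq, List.append_assoc]
    refine List.Perm.append_left _ ?_
    have h := loop_perm maxl s 1
    simpa using h
  · rw [rangefrom_eq]
    by_cases h : 0 ≤ s ∧ s ≤ maxl
    · rw [if_pos h, List.singleton_append, List.pairwise_cons]
      refine ⟨?_, loop_pairwise maxl s 1 (by omega)⟩
      intro v hv
      have := loop_key_lb maxl s 1 v hv
      have hk : 2 * |s - s| + (if s < s then 1 else 0) = (0:Int) := by simp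
      omega
    · simpa [h] using loop_pairwise maxl s 1 (by omega)
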